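-- pv_equiv track=rewrite | github.com/gladshire/bioinformatics | bioi.py | alist
-- ===== SOURCE A (Python) =====
-- def alist(fasta_dict, overlap):
--
--     adjac_list = []
--
--     for seq_key in fasta_dict:
--         curr_key = seq_key
--         for seq_key in fasta_dict:
--             if fasta_dict[curr_key] == fasta_dict[seq_key]:
--                 continue
--             if fasta_dict[curr_key][-overlap:] == fasta_dict[seq_key][:overlap]:
--                 adjac_list.append("{} {}".format(curr_key, seq_key))
--
--     return adjac_list
-- ===== SOURCE B (Python) =====
-- def alist(fasta_dict, overlap):
--     # Index every sequence by its length-`overlap` prefix once, then for each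
--     # sequence look up only the entries whose prefix equals its suffix.
--     index = {}
--     for key, seq in fasta_dict.items():
--         index.setdefault(seq[:overlap], []).append((key, seq))
--     adjac_list = []
--     for key, seq in fasta_dict.items():
--         for key2, seq2 in index.get(seq[-overlap:], []):
--             if seq2 != seq:
--                 adjac_list.append("{} {}".format(key, key2))
--     return adjac_list
-- ===== Notes on version B (the rewrite author's own statement) =====
-- stated objective: faster
-- what changed: Replaced the all-pairs nested scan with a hash index keyed by each sequence's length-overlap prefix, so each sequence's suffix is looked up once instead of compared against every other sequence.
import Mathlib
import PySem

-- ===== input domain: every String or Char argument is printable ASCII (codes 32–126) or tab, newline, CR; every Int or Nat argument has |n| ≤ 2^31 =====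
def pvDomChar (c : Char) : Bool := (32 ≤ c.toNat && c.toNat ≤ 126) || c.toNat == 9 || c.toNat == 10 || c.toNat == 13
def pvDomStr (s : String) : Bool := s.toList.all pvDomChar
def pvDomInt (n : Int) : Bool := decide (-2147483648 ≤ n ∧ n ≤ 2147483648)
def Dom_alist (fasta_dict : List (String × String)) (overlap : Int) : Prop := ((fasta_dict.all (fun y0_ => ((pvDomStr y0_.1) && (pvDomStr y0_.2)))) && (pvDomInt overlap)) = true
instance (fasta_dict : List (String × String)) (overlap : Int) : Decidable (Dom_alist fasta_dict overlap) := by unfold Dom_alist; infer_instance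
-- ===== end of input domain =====

-- B replaces A's quadratic all-pairs scan by a prefix index (dict keyed by seq[:overlap]),
-- then looks up each sequence's suffix once; same return value, fewer comparisons.

-- ===== PORT A =====
-- literal transliteration: the two nested 'for seq_key in fasta_dict' loops with dict lookups
def alist (fasta_dict : List (String × String)) (overlap : Int) : List String :=
  let d := PySem.Dict.ofList fasta_dict
  d.keys.foldl (fun adjac_list curr_key =>
    d.keys.foldl (fun adjac_list seq_key =>
      if d.getD curr_key "" == d.getD seq_key "" then adjac_list
      else if PySem.Str.slice (d.getD curr_key "") (some (-overlap)) none ==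
              PySem.Str.slice (d.getD seq_key "") none (some overlap) then
        adjac_list ++ [curr_key ++ " " ++ seq_key]
      else adjac_list) adjac_list) []

-- ===== PORT B =====
-- transliteration of Source B: build index[seq[:overlap]] once, look up each suffix
def alist_alt (fasta_dict : List (String × String)) (overlap : Int) : List String :=
  let d := PySem.Dict.ofList fasta_dict
  let index := d.items.foldl
    (fun ix kv => ix.modify (PySem.Str.slice kv.2 none (some overlap))
                    ([] : List (String × String)) (fun l => l ++ [kv]))
    PySem.Dict.empty
  d.items.foldl (fun adjac_list kv =>
    (index.getD (PySem.Str.slice kv.2 (some (-overlap)) none) []).foldl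
      (fun adjac_list kv2 =>
        if kv2.2 == kv.2 then adjac_list
        else adjac_list ++ [kv.1 ++ " " ++ kv2.1]) adjac_list) []

-- ===== PRECONDITION & SPEC =====
def Spec_alist (fasta_dict : List (String × String)) (overlap : Int) (out : List String) : Prop := out = alist_alt fasta_dict overlap
instance (fasta_dict : List (String × String)) (overlap : Int) (out : List String) : Decidable (Spec_alist fasta_dict overlap out) := by unfold Spec_alist; infer_instance

-- ===== CLAIM (what is proved, stated in full; the proofs are below) =====
def Claim_equal_alist : Prop := ∀ (fasta_dict : List (String × String)) (overlap : Int), Dom_alist fasta_dict overlap → Spec_alist fasta_dict overlap (alist fasta_dict overlap)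

-- ===== LEMMAS AND PROOFS =====

theorem beq_symm {α : Type} [BEq α] [LawfulBEq α] (a b : α) : (a == b) = (b == a) := by
  by_cases h : a = b
  · simp [h]
  · have h' : ¬ b = a := fun e => h e.symm
    simp [h, h']

-- skip/append loop body = append over a filter
theorem foldl_skip_append {α β : Type} (c g : α → Bool) (f : α → β) :
    ∀ (l : List α) (acc : List β),
      l.foldl (fun acc x => if c x then acc else if g x then acc ++ [f x] else acc) acc
        = acc ++ (l.filter (fun x => !c x && g x)).map f := by
  intro l
  induction l with
  | nil => intro acc; simp
  | cons x t ih =>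
    intro acc
    by_cases h1 : c x
    · simp [List.foldl_cons, h1, ih]
    · by_cases h2 : g x
      · simp [List.foldl_cons, h1, h2, ih]
      · simp [List.foldl_cons, h1, h2, ih]

theorem foldl_skip_append' {α β : Type} (c : α → Bool) (f : α → β) :
    ∀ (l : List α) (acc : List β),
      l.foldl (fun acc x => if c x then acc else acc ++ [f x]) acc
        = acc ++ (l.filter (fun x => !c x)).map f := by
  intro l
  induction l with
  | nil => intro acc; simp
  | cons x t ih =>
    intro acc
    by_cases h1 : c x
    · simp [List.foldl_cons, h1, ih]
    · simp [List.foldl_cons, h1, ih]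

-- what B's index fold computes at a key
theorem index_getD (items : List (String × String)) (overlap : Int) (c : String) :
    (items.foldl
      (fun ix kv => ix.modify (PySem.Str.slice kv.2 none (some overlap))
                      ([] : List (String × String)) (fun l => l ++ [kv]))
      PySem.Dict.empty).getD c []
      = items.filter (fun kv => PySem.Str.slice kv.2 none (some overlap) == c) := by
  have h := PySem.Dict.getD_foldl_modify_append
    (items.map (fun kv => (PySem.Str.slice kv.2 none (some overlap), kv)))
    (PySem.Dict.empty : PySem.Dict String (List (String × String))) c
  rw [List.foldl_map] at h
  simp only [List.filter_map, List.map_map, Function.comp_def, PySem.Dict.getD_empty,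
    List.nil_append] at h
  simpa using h

theorem alist_eq_alt (fasta_dict : List (String × String)) (overlap : Int) :
    alist fasta_dict overlap = alist_alt fasta_dict overlap := by
  unfold alist alist_alt
  set d := PySem.Dict.ofList fasta_dict with hd
  have hnd : d.keys.Nodup := PySem.Dict.nodup_keys_ofList fasta_dict
  have hget : ∀ kv ∈ d.items, d.getD kv.1 "" = kv.2 := by
    intro kv hkv
    exact PySem.Dict.getD_of_mem_items d (by exact hkv) hnd ""
  show List.foldl _ _ d.keys = List.foldl _ _ d.items
  have hkeys : d.keys = d.items.map (fun p => p.1) := rfl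
  rw [hkeys, List.foldl_map]
  apply PySem.List.foldl_congr_mem
  intro acc kv hkv
  rw [index_getD d.items overlap, List.foldl_map]
  have houter := hget kv hkv
  rw [PySem.List.foldl_congr_mem d.items _
      (fun acc kv' => if kv.2 == kv'.2 then acc
        else if PySem.Str.slice kv.2 (some (-overlap)) none ==
                PySem.Str.slice kv'.2 none (some overlap) then
          acc ++ [kv.1 ++ " " ++ kv'.1] else acc) acc
      (by intro a kv' hkv'; rw [houter, hget kv' hkv'])]
  rw [foldl_skip_append (fun kv' => kv.2 == kv'.2)
        (fun kv' => PySem.Str.slice kv.2 (some (-overlap)) none ==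
                PySem.Str.slice kv'.2 none (some overlap))
        (fun kv' => kv.1 ++ " " ++ kv'.1) d.items acc,
      foldl_skip_append' (fun kv2 => kv2.2 == kv.2) (fun kv2 => kv.1 ++ " " ++ kv2.1)
        (List.filter (fun kv2 => PySem.Str.slice kv2.2 none (some overlap) ==
            PySem.Str.slice kv.2 (some (-overlap)) none) d.items) acc,
      List.filter_filter]
  refine congrArg (acc ++ ·) (congrArg (List.map _) (List.filter_congr ?_))
  intro x _
  rw [beq_symm kv.2 x.2,
      beq_symm (PySem.Str.slice kv.2 (some (-overlap)) none) (PySem.Str.slice x.2 none (some overlap))]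

-- ===== VERDICT (by name: the statement is the Claim_ definition above) =====
theorem alist_spec : Claim_equal_alist := by
  intro fd ov _
  unfold Spec_alist
  exact alist_eq_alt fd ov
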